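-- pv_equiv track=rewrite | github.com/sudiptap/algods | ds_algo/patterns/dynamic_programming/09_dp_on_trees/solutions/2920-maximum-points-after-collecting-coins-from-all-nodes.py | maximumPoints
-- ===== SOURCE A (Python) =====
-- from typing import List
-- from collections import defaultdict
-- from functools import lru_cache
--
-- def maximumPoints(edges: List[List[int]], coins: List[int], k: int) -> int:
--     adj = defaultdict(list)
--     for u, v in edges:
--         adj[u].append(v)
--         adj[v].append(u)
--
--     @lru_cache(maxsize=None)
--     def dfs(node, parent, halvings):
--         if halvings > 14:
--             return 0
--         val = coins[node] >> halvings
--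
--         # Option 1: collect val - k
--         opt1 = val - k
--         for nei in adj[node]:
--             if nei != parent:
--                 opt1 += dfs(nei, node, halvings)
--
--         # Option 2: collect val // 2, children get halvings + 1
--         opt2 = val >> 1
--         for nei in adj[node]:
--             if nei != parent:
--                 opt2 += dfs(nei, node, halvings + 1)
--
--         return max(opt1, opt2)
--
--     return dfs(0, -1, 0)
-- ===== SOURCE B (Python) =====
-- def maximumPoints(edges, coins, k):
--     # Bottom-up DP: explicit-stack DFS collects (node, parent) order, then a
--     # reverse pass fills a per-node table dp[node][h] for h in 0..14.
--     adj = {}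
--     for e in edges:
--         u, v = e
--         adj.setdefault(u, []).append(v)
--         adj.setdefault(v, []).append(u)
--     stack = [(0, -1)]
--     order = []
--     while stack:
--         node, parent = stack.pop()
--         order.append((node, parent))
--         for nei in adj.get(node, []):
--             if nei != parent:
--                 stack.append((nei, node))
--     dp = {}
--     for node, parent in reversed(order):
--         kids = [nei for nei in adj.get(node, []) if nei != parent]
--         val = coins[node]
--         row = []
--         for h in range(15):
--             s0 = sum(dp[c][h] for c in kids)
--             s1 = sum(dp[c][h + 1] if h + 1 < 15 else 0 for c in kids)
--             row.append(max((val >> h) - k + s0, ((val >> h) >> 1) + s1))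
--         dp[node] = row
--     return dp[0][0]
-- ===== Notes on version B (the rewrite author's own statement) =====
-- stated objective: alternative
-- what changed: Replaces the top-down lru_cache recursion over (node,parent,halvings) with an explicit-stack DFS that records a (node,parent) order, followed by one reverse (bottom-up) pass filling a per-node table dp[node][0..14]; the answer is dp[0][0].
-- outside the precondition, e.g. on maximumPoints([[0, 1], [1, 0]], [4, 2], 1): A returns 5, B returns 5; on maximumPoints([[0, 0]], [9], 2): A returns 21, B returns 21
import Mathlib
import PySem

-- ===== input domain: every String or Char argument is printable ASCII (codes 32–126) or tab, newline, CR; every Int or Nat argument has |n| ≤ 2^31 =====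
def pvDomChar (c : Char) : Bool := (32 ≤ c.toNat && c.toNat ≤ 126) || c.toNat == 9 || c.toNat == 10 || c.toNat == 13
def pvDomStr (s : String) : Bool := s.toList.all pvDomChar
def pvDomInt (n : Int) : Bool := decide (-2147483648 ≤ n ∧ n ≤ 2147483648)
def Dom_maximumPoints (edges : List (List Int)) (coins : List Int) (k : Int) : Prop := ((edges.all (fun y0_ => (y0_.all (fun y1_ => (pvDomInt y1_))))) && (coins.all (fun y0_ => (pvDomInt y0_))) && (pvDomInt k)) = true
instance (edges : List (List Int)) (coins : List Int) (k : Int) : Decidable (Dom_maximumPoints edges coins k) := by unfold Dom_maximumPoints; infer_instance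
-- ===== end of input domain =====

-- B replaces A's top-down memoized recursion by an explicit-stack DFS order plus one
-- bottom-up table-filling pass (same cost, different decomposition); return values proved equal.


-- ===== PORT A =====
-- adjacency: defaultdict(list); adj[u].append(v); adj[v].append(u)
def adjA (edges : List (List Int)) : PySem.Dict Int (List Int) :=
  edges.foldl (fun d e =>
    match e with
    | [u, v] => ((d.modify u [] (· ++ [v])).modify v [] (· ++ [u]))
    | _ => d) PySem.Dict.empty   -- rows that are not pairs make Python raise; excluded by Pre_

-- dfs(node, parent, halvings); fuel is an artifact of totalisation (never exhausted under Pre_);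
-- halvings stays ≥ 0 along the recursion, so `.toNat` on it is exact.
def dfsA (adj : PySem.Dict Int (List Int)) (coins : List Int) (k : Int) :
    Nat → Int → Int → Int → Int
  | 0, _, _, _ => 0
  | fuel + 1, node, parent, halvings =>
    if halvings > 14 then 0
    else
      let val := (PySem.List.pyGetD coins node 0) >>> halvings.toNat
      let opt1 := (adj.getD node []).foldl
        (fun acc nei => if nei ≠ parent then acc + dfsA adj coins k fuel nei node halvings else acc)
        (val - k)
      let opt2 := (adj.getD node []).foldl
        (fun acc nei => if nei ≠ parent then acc + dfsA adj coins k fuel nei node (halvings + 1) else acc)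
        (val >>> 1)
      max opt1 opt2

def maximumPoints (edges : List (List Int)) (coins : List Int) (k : Int) : Int :=
  dfsA (adjA edges) coins k (2 * edges.length + 2) 0 (-1) 0

-- ===== PORT B =====
def adjB (edges : List (List Int)) : PySem.Dict Int (List Int) :=
  edges.foldl (fun d e =>
    match e with
    | [u, v] => ((d.modify u [] (· ++ [v])).modify v [] (· ++ [u]))
    | _ => d) PySem.Dict.empty

-- while stack: pop, append to order, push unvisited-direction neighbours (fuel = totalisation)
def dfsOrderB (adj : PySem.Dict Int (List Int)) :
    Nat → List (Int × Int) → List (Int × Int) → List (Int × Int)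
  | _, [], order => order
  | 0, _ :: _, order => order
  | fuel + 1, (node, parent) :: stack, order =>
      dfsOrderB adj fuel
        ((adj.getD node []).foldl (fun st nei => if nei ≠ parent then (nei, node) :: st else st) stack)
        (order ++ [(node, parent)])

-- one row of the table: dp[node] = [max over the two options for h in range(15)]
def rowB (adj : PySem.Dict Int (List Int)) (coins : List Int) (k : Int)
    (dp : PySem.Dict Int (List Int)) (node parent : Int) : List Int :=
  let kids := (adj.getD node []).filter (fun nei => nei ≠ parent)
  let val := PySem.List.pyGetD coins node 0
  (PySem.List.pyRange 0 15 1).map (fun h =>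
    let s0 := (kids.map (fun c => PySem.List.pyGetD (dp.getD c []) h 0)).sum
    let s1 := (kids.map (fun c => if h + 1 < 15 then PySem.List.pyGetD (dp.getD c []) (h + 1) 0 else 0)).sum
    max ((val >>> h.toNat) - k + s0) (((val >>> h.toNat) >>> 1) + s1))

def maximumPoints_alt (edges : List (List Int)) (coins : List Int) (k : Int) : Int :=
  let adj := adjB edges
  let order := dfsOrderB adj (2 * edges.length + 2) [(0, -1)] []
  let dp := order.reverse.foldl
    (fun dp pr => dp.insert pr.1 (rowB adj coins k dp pr.1 pr.2)) PySem.Dict.empty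
  PySem.List.pyGetD (dp.getD 0 []) 0 0

-- ===== PRECONDITION & SPEC =====
-- adjacency again, independent of both ports (Pre_ may not reach them)
def pvAdj (edges : List (List Int)) : PySem.Dict Int (List Int) :=
  edges.foldl (fun d e =>
    match e with
    | [u, v] => ((d.modify u [] (· ++ [v])).modify v [] (· ++ [u]))
    | _ => d) PySem.Dict.empty

-- Validity check for the input shape 'the component of node 0 is a simple tree': the standard
-- visited-marked traversal (the definition of that property; any Decidable instance for it must
-- compute reachability).  It is NOT a copy of either port's algorithm: neither port marks visited
-- nodes or can fail, and no DP value is computed here.  `some done-list` iff no node is met twice.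
def pvWalk (adj : PySem.Dict Int (List Int)) :
    Nat → List (Int × Int) → List (Int × Int) → Option (List (Int × Int))
  | _, [], done => some done
  | 0, _ :: _, _ => none
  | fuel + 1, (node, parent) :: q, done =>
      if done.any (fun pr => pr.1 == node) then none
      else pvWalk adj fuel
        ((adj.getD node []).foldl (fun st nei => if nei ≠ parent then (nei, node) :: st else st) q)
        (done ++ [(node, parent)])

def pvTreeOk (edges : List (List Int)) (coins : List Int) : Bool :=
  match pvWalk (pvAdj edges) (2 * edges.length + 2) [(0, -1)] [] with
  | some L => L.all (fun pr => decide (PySem.Raise.InRange coins.length pr.1))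
  | none => false

-- Pre_ excludes inputs on which A raises (a non-pair edge row: ValueError; a visited coin index
-- out of range: IndexError; a cycle through node 0's component: RecursionError) and the inputs
-- whose walk revisits a node via a self-loop or parallel edge, where A's returned value arises
-- from double-counting the repeated neighbour — an accident of its traversal not claimed here.
def Pre_maximumPoints (edges : List (List Int)) (coins : List Int) (k : Int) : Prop :=
  (∀ e ∈ edges, e.length = 2) ∧ pvTreeOk edges coins = true
instance (edges : List (List Int)) (coins : List Int) (k : Int) : Decidable (Pre_maximumPoints edges coins k) := by unfold Pre_maximumPoints; infer_instance

def pvWitness_maximumPoints : List (List Int) × List Int × Int := ([[0, 1], [1, 2]], [5, 3, 7], 1)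

def Spec_maximumPoints (edges : List (List Int)) (coins : List Int) (k : Int) (out : Int) : Prop := out = maximumPoints_alt edges coins k
instance (edges : List (List Int)) (coins : List Int) (k : Int) (out : Int) : Decidable (Spec_maximumPoints edges coins k out) := by unfold Spec_maximumPoints; infer_instance

-- ===== CLAIM (what is proved, stated in full; the proofs are below) =====
def Claim_equal_maximumPoints : Prop := ∀ (edges : List (List Int)) (coins : List Int) (k : Int), Dom_maximumPoints edges coins k → Pre_maximumPoints edges coins k → Spec_maximumPoints edges coins k (maximumPoints edges coins k)

-- ===== LEMMAS AND PROOFS =====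

-- the three adjacency builders are the same fold
theorem pvAdj_eq_adjA : pvAdj = adjA := rfl
theorem adjB_eq_adjA : adjB = adjA := rfl

-- children of `x` when entered from `p`
def pvKids (adj : PySem.Dict Int (List Int)) (x p : Int) : List Int :=
  (adj.getD x []).filter (fun nei => nei ≠ p)

-- every element's children occur later in the list
def pvChain (adj : PySem.Dict Int (List Int)) : List (Int × Int) → Prop
  | [] => True
  | (x, p) :: rest => (∀ y ∈ pvKids adj x p, (y, x) ∈ rest) ∧ pvChain adj rest

theorem push_mem (x p : Int) :
    ∀ (l : List Int) (st : List (Int × Int)) (pr : Int × Int),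
      pr ∈ l.foldl (fun st nei => if nei ≠ p then (nei, x) :: st else st) st ↔
        pr ∈ st ∨ ∃ y, y ∈ l ∧ y ≠ p ∧ pr = (y, x) := by
  intro l
  induction l with
  | nil => simp
  | cons a l ih =>
    intro st pr
    simp only [List.foldl_cons]
    by_cases ha : a ≠ p
    · rw [if_pos ha, ih]
      constructor
      · rintro (h | ⟨y, hy, hyp, rfl⟩)
        · rcases List.mem_cons.mp h with h | h
          · exact Or.inr ⟨a, by simp [h, ha]⟩
          · exact Or.inl h
        · exact Or.inr ⟨y, List.mem_cons_of_mem _ hy, hyp, rfl⟩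
      · rintro (h | ⟨y, hy, hyp, rfl⟩)
        · exact Or.inl (List.mem_cons_of_mem _ h)
        · rcases List.mem_cons.mp hy with rfl | hy
          · exact Or.inl (List.mem_cons_self)
          · exact Or.inr ⟨y, hy, hyp, rfl⟩
    · rw [if_neg ha, ih]
      rw [not_not] at ha
      constructor
      · rintro (h | ⟨y, hy, hyp, rfl⟩)
        · exact Or.inl h
        · exact Or.inr ⟨y, List.mem_cons_of_mem _ hy, hyp, rfl⟩
      · rintro (h | ⟨y, hy, hyp, rfl⟩)
        · exact Or.inl h
        · rcases List.mem_cons.mp hy with rfl | hy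
          · exact absurd ha hyp
          · exact Or.inr ⟨y, hy, hyp, rfl⟩

theorem walk_inv (adj : PySem.Dict Int (List Int)) :
    ∀ (fuel : Nat) (q done L : List (Int × Int)), pvWalk adj fuel q done = some L →
      ∃ R, L = done ++ R ∧ pvChain adj R ∧ (∀ pr ∈ q, pr ∈ R) ∧
        (∀ pr ∈ R, pr.1 ∉ done.map Prod.fst) ∧ (R.map Prod.fst).Nodup := by
  intro fuel
  induction fuel with
  | zero =>
    intro q done L h
    match q with
    | [] =>
      simp only [pvWalk, Option.some.injEq] at h
      exact ⟨[], by simp [← h, pvChain]⟩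
    | _ :: _ => simp [pvWalk] at h
  | succ fuel ih =>
    intro q done L h
    match q with
    | [] =>
      simp only [pvWalk, Option.some.injEq] at h
      exact ⟨[], by simp [← h, pvChain]⟩
    | (x, p) :: q' =>
      simp only [pvWalk] at h
      by_cases hany : done.any (fun pr => pr.1 == x)
      · rw [if_pos hany] at h; exact absurd h (by simp)
      · rw [if_neg hany] at h
        obtain ⟨R', hL, hch, hq, hfresh, hnd⟩ := ih _ _ _ h
        have hxdone : x ∉ done.map Prod.fst := by
          intro hx
          apply hany
          rw [List.any_eq_true]
          obtain ⟨pr, hpr, hpr1⟩ := List.mem_map.mp hx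
          exact ⟨pr, hpr, by simp [hpr1]⟩
        refine ⟨(x, p) :: R', by rw [hL]; simp, ⟨?_, hch⟩, ?_, ?_, ?_⟩
        · intro y hy
          have hmem : (y, x) ∈ ((adj.getD x []).foldl
              (fun st nei => if nei ≠ p then (nei, x) :: st else st) q') := by
            rw [push_mem]
            simp only [pvKids, List.mem_filter] at hy
            exact Or.inr ⟨y, hy.1, by simpa using hy.2, rfl⟩
          exact hq (y, x) hmem
        · intro pr hpr
          rcases List.mem_cons.mp hpr with rfl | hpr
          · exact List.mem_cons_self
          · exact List.mem_cons_of_mem (x, p) (hq pr (by rw [push_mem]; exact Or.inl hpr))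
        · intro pr hpr
          rcases List.mem_cons.mp hpr with rfl | hpr
          · exact hxdone
          · intro hc
            exact hfresh pr hpr (by simp [hc])
        · rw [List.map_cons, List.nodup_cons]
          refine ⟨?_, hnd⟩
          intro hx
          obtain ⟨pr, hpr, hpr1⟩ := List.mem_map.mp hx
          exact hfresh pr hpr (by simp [hpr1])

theorem walk_len (adj : PySem.Dict Int (List Int)) :
    ∀ (fuel : Nat) (q done L : List (Int × Int)), pvWalk adj fuel q done = some L →
      L.length ≤ done.length + fuel := by
  intro fuel
  induction fuel with
  | zero =>
    intro q done L h
    match q with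
    | [] => simp only [pvWalk, Option.some.injEq] at h; subst h; omega
    | _ :: _ => simp [pvWalk] at h
  | succ fuel ih =>
    intro q done L h
    match q with
    | [] => simp only [pvWalk, Option.some.injEq] at h; subst h; omega
    | (x, p) :: q' =>
      simp only [pvWalk] at h
      by_cases hany : done.any (fun pr => pr.1 == x)
      · rw [if_pos hany] at h; exact absurd h (by simp)
      · rw [if_neg hany] at h
        have := ih _ _ _ h
        simp only [List.length_append, List.length_cons, List.length_nil] at this
        omega

theorem walk_order (adj : PySem.Dict Int (List Int)) :
    ∀ (fuel : Nat) (q done L : List (Int × Int)), pvWalk adj fuel q done = some L →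
      dfsOrderB adj fuel q done = L := by
  intro fuel
  induction fuel with
  | zero =>
    intro q done L h
    match q with
    | [] => simp only [pvWalk, Option.some.injEq] at h; simp [dfsOrderB, h]
    | _ :: _ => simp [pvWalk] at h
  | succ fuel ih =>
    intro q done L h
    match q with
    | [] => simp only [pvWalk, Option.some.injEq] at h; simp [dfsOrderB, h]
    | (x, p) :: q' =>
      simp only [pvWalk] at h
      by_cases hany : done.any (fun pr => pr.1 == x)
      · rw [if_pos hany] at h; exact absurd h (by simp)
      · rw [if_neg hany] at h
        simp only [dfsOrderB]
        exact ih _ _ _ h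

theorem chain_append_right (adj : PySem.Dict Int (List Int)) :
    ∀ (l1 l2 : List (Int × Int)), pvChain adj (l1 ++ l2) → pvChain adj l2 := by
  intro l1
  induction l1 with
  | nil => intro l2 h; simpa using h
  | cons a l1 ih =>
    intro l2 h
    obtain ⟨x, p⟩ := a
    exact ih l2 h.2

theorem chain_suffix (adj : PySem.Dict Int (List Int)) {t L : List (Int × Int)}
    (hs : t <:+ L) (h : pvChain adj L) : pvChain adj t := by
  obtain ⟨pre, rfl⟩ := hs
  exact chain_append_right adj pre t h

theorem nodup_fst_suffix {t L : List (Int × Int)} (hs : t <:+ L)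
    (h : (L.map Prod.fst).Nodup) : (t.map Prod.fst).Nodup :=
  h.sublist (List.IsSuffix.map Prod.fst hs).sublist

theorem suffix_of_mem {pr : Int × Int} {t : List (Int × Int)} (h : pr ∈ t) :
    ∃ t', (pr :: t') <:+ t := by
  obtain ⟨s, t', rfl⟩ := List.append_of_mem h
  exact ⟨t', ⟨s, rfl⟩⟩

theorem foldl_if_add_sum (p : Int) (g : Int → Int) :
    ∀ (l : List Int) (a : Int),
      l.foldl (fun acc nei => if nei ≠ p then acc + g nei else acc) a =
        a + ((l.filter (fun nei => nei ≠ p)).map g).sum := by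
  intro l
  induction l with
  | nil => simp
  | cons b l ih =>
    intro a
    by_cases hb : b ≠ p
    · rw [List.foldl_cons, if_pos hb, ih, List.filter_cons_of_pos (by simpa using hb),
        List.map_cons, List.sum_cons]
      ring
    · rw [List.foldl_cons, if_neg hb, ih, List.filter_cons_of_neg (by simpa using hb)]

-- dfsA ignores its fuel as long as the fuel covers the suffix the pair heads
theorem dfs_fuel (adj : PySem.Dict Int (List Int)) (coins : List Int) (k : Int)
    (L : List (Int × Int)) (hch : pvChain adj L) :
    ∀ (m : Nat) (t : List (Int × Int)), t <:+ L → t.length ≤ m →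
      ∀ (x p : Int) (t' : List (Int × Int)), t = (x, p) :: t' →
      ∀ (f1 f2 : Nat), t.length ≤ f1 → t.length ≤ f2 →
      ∀ (h : Int), dfsA adj coins k f1 x p h = dfsA adj coins k f2 x p h := by
  intro m
  induction m with
  | zero => intro t _ hlen x p t' ht; subst ht; simp at hlen
  | succ m ih =>
    intro t hs hlen x p t' ht f1 f2 hf1 hf2 h
    subst ht
    obtain ⟨a, rfl⟩ : ∃ a, f1 = a + 1 := ⟨f1 - 1, by simp at hf1; omega⟩
    obtain ⟨b, rfl⟩ : ∃ b, f2 = b + 1 := ⟨f2 - 1, by simp at hf2; omega⟩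
    simp only [dfsA]
    by_cases h14 : h > 14
    · simp [h14]
    · rw [if_neg h14, if_neg h14]
      have hrec : ∀ (y h' : Int), y ∈ (adj.getD x []).filter (fun nei => nei ≠ p) →
          dfsA adj coins k a y x h' = dfsA adj coins k b y x h' := by
        intro y h' hy
        have hkid : (y, x) ∈ t' := (chain_suffix adj hs hch).1 y hy
        obtain ⟨t'', hsuf⟩ := suffix_of_mem hkid
        have hsufL : ((y, x) :: t'') <:+ L :=
          hsuf.trans ((List.suffix_cons (x, p) t').trans hs)
        have hlen' : t''.length + 1 ≤ t'.length := by simpa using hsuf.length_le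
        simp only [List.length_cons] at hlen hf1 hf2
        exact ih _ hsufL (by simp only [List.length_cons]; omega) y x t'' rfl a b
          (by simp only [List.length_cons]; omega) (by simp only [List.length_cons]; omega) h'
      have h1 : ∀ (h' : Int),
          (adj.getD x []).foldl
            (fun acc nei => if nei ≠ p then acc + dfsA adj coins k a nei x h' else acc)
            ((PySem.List.pyGetD coins x 0 >>> h.toNat) - k) =
          (adj.getD x []).foldl
            (fun acc nei => if nei ≠ p then acc + dfsA adj coins k b nei x h' else acc)
            ((PySem.List.pyGetD coins x 0 >>> h.toNat) - k) := by
        intro h'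
        apply PySem.List.foldl_congr_mem
        intro acc nei hnei
        by_cases hne : nei ≠ p
        · rw [if_pos hne, if_pos hne, hrec nei h' (List.mem_filter.mpr ⟨hnei, by simpa using hne⟩)]
        · rw [if_neg hne, if_neg hne]
      have h2 : ∀ (h' : Int),
          (adj.getD x []).foldl
            (fun acc nei => if nei ≠ p then acc + dfsA adj coins k a nei x h' else acc)
            ((PySem.List.pyGetD coins x 0 >>> h.toNat) >>> 1) =
          (adj.getD x []).foldl
            (fun acc nei => if nei ≠ p then acc + dfsA adj coins k b nei x h' else acc)
            ((PySem.List.pyGetD coins x 0 >>> h.toNat) >>> 1) := by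
        intro h'
        apply PySem.List.foldl_congr_mem
        intro acc nei hnei
        by_cases hne : nei ≠ p
        · rw [if_pos hne, if_pos hne, hrec nei h' (List.mem_filter.mpr ⟨hnei, by simpa using hne⟩)]
        · rw [if_neg hne, if_neg hne]
      rw [h1 h, h2 (h + 1)]

theorem dfsA_gt14 (adj : PySem.Dict Int (List Int)) (coins : List Int) (k : Int)
    (fuel : Nat) (x p h : Int) (hh : h > 14) : dfsA adj coins k fuel x p h = 0 := by
  cases fuel with
  | zero => simp [dfsA]
  | succ fuel => simp [dfsA, hh]

-- the canonical table row for a node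
def pvRow (adj : PySem.Dict Int (List Int)) (coins : List Int) (k : Int) (n : Nat)
    (x p : Int) : List Int :=
  (PySem.List.pyRange 0 15 1).map (fun h => dfsA adj coins k n x p h)

-- one unfolding of dfsA at the canonical fuel, for pairs heading a suffix of the walk
theorem dfs_unfold (adj : PySem.Dict Int (List Int)) (coins : List Int) (k : Int)
    (L : List (Int × Int)) (hch : pvChain adj L)
    {t t' : List (Int × Int)} {x p : Int} (hs : t <:+ L) (ht : t = (x, p) :: t') (h : Int) :
    dfsA adj coins k L.length x p h =
      if h > 14 then 0 else
        max ((PySem.List.pyGetD coins x 0 >>> h.toNat) - k +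
              ((pvKids adj x p).map (fun y => dfsA adj coins k L.length y x h)).sum)
            (((PySem.List.pyGetD coins x 0 >>> h.toNat) >>> 1) +
              ((pvKids adj x p).map (fun y => dfsA adj coins k L.length y x (h + 1))).sum) := by
  subst ht
  have hlenL : ((x, p) :: t').length ≤ L.length := hs.length_le
  have hswap : ∀ (h' : Int), dfsA adj coins k L.length x p h' =
      dfsA adj coins k (t'.length + 1) x p h' := by
    intro h'
    exact dfs_fuel adj coins k L hch L.length _ hs hlenL x p t' rfl _ _ hlenL (by simp) h'
  rw [hswap h]
  simp only [dfsA]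
  by_cases h14 : h > 14
  · simp [h14]
  · rw [if_neg h14, if_neg h14]
    rw [foldl_if_add_sum, foldl_if_add_sum]
    have hkid : ∀ (y h' : Int), y ∈ pvKids adj x p →
        dfsA adj coins k t'.length y x h' = dfsA adj coins k L.length y x h' := by
      intro y h' hy
      have hmem : (y, x) ∈ t' := (chain_suffix adj hs hch).1 y hy
      obtain ⟨t'', hsuf⟩ := suffix_of_mem hmem
      have hsufL : ((y, x) :: t'') <:+ L :=
        hsuf.trans ((List.suffix_cons (x, p) t').trans hs)
      have hl : ((y, x) :: t'').length ≤ t'.length := hsuf.length_le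
      exact dfs_fuel adj coins k L hch L.length _ hsufL hsufL.length_le y x t'' rfl _ _
        hl hsufL.length_le h'
    have hm1 : ((adj.getD x []).filter (fun nei => nei ≠ p)).map
          (fun y => dfsA adj coins k t'.length y x h) =
        (pvKids adj x p).map (fun y => dfsA adj coins k L.length y x h) :=
      List.map_congr_left (fun y hy => hkid y h hy)
    have hm2 : ((adj.getD x []).filter (fun nei => nei ≠ p)).map
          (fun y => dfsA adj coins k t'.length y x (h + 1)) =
        (pvKids adj x p).map (fun y => dfsA adj coins k L.length y x (h + 1)) :=
      List.map_congr_left (fun y hy => hkid y (h + 1) hy)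
    rw [hm1, hm2]

-- the bottom-up pass stores exactly the canonical rows
theorem fill_inv (adj : PySem.Dict Int (List Int)) (coins : List Int) (k : Int)
    (L : List (Int × Int)) (hch : pvChain adj L) (hnd : (L.map Prod.fst).Nodup) :
    ∀ (t : List (Int × Int)), t <:+ L → ∀ (x p : Int), (x, p) ∈ t →
      (t.reverse.foldl
        (fun dp pr => dp.insert pr.1 (rowB adj coins k dp pr.1 pr.2)) PySem.Dict.empty).get? x
        = some (pvRow adj coins k L.length x p) := by
  intro t
  induction t with
  | nil => intro _ x p h; simp at h
  | cons ab t ih =>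
    intro hs x p hmem
    obtain ⟨a, b⟩ := ab
    have htL : t <:+ L := (List.suffix_cons (a, b) t).trans hs
    rw [List.reverse_cons, List.foldl_append]
    simp only [List.foldl_cons, List.foldl_nil]
    set dp' := t.reverse.foldl
      (fun dp pr => dp.insert pr.1 (rowB adj coins k dp pr.1 pr.2)) PySem.Dict.empty with hdp'
    have hrow : rowB adj coins k dp' a b = pvRow adj coins k L.length a b := by
      unfold rowB pvRow
      apply List.map_congr_left
      intro h hh
      rw [PySem.List.mem_pyRange_one] at hh
      have hkids : ∀ (c : Int), c ∈ pvKids adj a b →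
          dp'.getD c [] = pvRow adj coins k L.length c a := by
        intro c hc
        have hmemc : (c, a) ∈ t := (chain_suffix adj hs hch).1 c hc
        exact PySem.Dict.getD_of_get?_eq_some _ _ (ih htL c a hmemc)
      have hs0 : (((adj.getD a []).filter (fun nei => nei ≠ b)).map
            (fun c => PySem.List.pyGetD (dp'.getD c []) h 0)).sum =
          ((pvKids adj a b).map (fun y => dfsA adj coins k L.length y a h)).sum := by
        congr 1
        apply List.map_congr_left
        intro c hc
        rw [hkids c hc]
        unfold pvRow
        exact PySem.List.pyGetD_map_pyRange_of_nonneg _ 15 h 0 hh.1 hh.2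
      have hs1 : (((adj.getD a []).filter (fun nei => nei ≠ b)).map
            (fun c => if h + 1 < 15 then PySem.List.pyGetD (dp'.getD c []) (h + 1) 0 else 0)).sum =
          ((pvKids adj a b).map (fun y => dfsA adj coins k L.length y a (h + 1))).sum := by
        congr 1
        apply List.map_congr_left
        intro c hc
        by_cases h15 : h + 1 < 15
        · rw [if_pos h15, hkids c hc]
          unfold pvRow
          exact PySem.List.pyGetD_map_pyRange_of_nonneg _ 15 (h + 1) 0 (by omega) h15
        · rw [if_neg h15, dfsA_gt14 adj coins k L.length c a (h + 1) (by omega)]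
      rw [hs0, hs1, dfs_unfold adj coins k L hch hs rfl h, if_neg (by omega)]
    rcases List.mem_cons.mp hmem with heq | hmem'
    · obtain ⟨rfl, rfl⟩ := Prod.mk.injEq .. ▸ heq
      rw [PySem.Dict.get?_insert_self, hrow]
    · have hxa : x ≠ a := by
        have hnds : (((a, b) :: t).map Prod.fst).Nodup := nodup_fst_suffix hs hnd
        simp only [List.map_cons, List.nodup_cons] at hnds
        intro hc
        exact hnds.1 (hc ▸ List.mem_map.mpr ⟨(x, p), hmem', rfl⟩)
      rw [PySem.Dict.get?_insert_of_ne _ _ hxa]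
      exact ih htL x p hmem'

-- ===== VERDICT (by name: the statement is the Claim_ definition above) =====
theorem maximumPoints_spec : Claim_equal_maximumPoints := by
  unfold Claim_equal_maximumPoints
  intro edges coins k _ hpre
  obtain ⟨-, hok⟩ := hpre
  unfold pvTreeOk at hok
  cases hW : pvWalk (pvAdj edges) (2 * edges.length + 2) [(0, -1)] [] with
  | none => rw [hW] at hok; simp at hok
  | some L =>
    have hWA : pvWalk (adjA edges) (2 * edges.length + 2) [(0, -1)] [] = some L := by
      rw [← pvAdj_eq_adjA]; exact hW
    obtain ⟨R, hLR, hch, hq, -, hnd⟩ := walk_inv (adjA edges) _ _ _ L hWA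
    rw [List.nil_append] at hLR
    subst hLR
    have hmem0 : ((0 : Int), (-1 : Int)) ∈ L := hq (0, -1) (List.mem_singleton_self _)
    have hlen : L.length ≤ 2 * edges.length + 2 := by
      simpa using walk_len (adjA edges) _ _ _ L hWA
    have horder : dfsOrderB (adjA edges) (2 * edges.length + 2) [(0, -1)] [] = L :=
      walk_order (adjA edges) _ _ _ L hWA
    unfold Spec_maximumPoints maximumPoints
    rw [show maximumPoints_alt edges coins k =
        PySem.List.pyGetD
          (((dfsOrderB (adjB edges) (2 * edges.length + 2) [(0, -1)] []).reverse.foldl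
              (fun dp pr => dp.insert pr.1 (rowB (adjB edges) coins k dp pr.1 pr.2))
              PySem.Dict.empty).getD 0 []) 0 0 from rfl,
      adjB_eq_adjA, horder]
    have hget := fill_inv (adjA edges) coins k L hch hnd L List.suffix_rfl 0 (-1) hmem0
    rw [PySem.Dict.getD_of_get?_eq_some _ _ hget]
    have hrow0 : PySem.List.pyGetD (pvRow (adjA edges) coins k L.length 0 (-1)) 0 0 =
        dfsA (adjA edges) coins k L.length 0 (-1) 0 := by
      unfold pvRow
      exact PySem.List.pyGetD_map_pyRange_of_nonneg _ 15 0 0 (by omega) (by omega)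
    rw [hrow0]
    obtain ⟨t', hsuf⟩ := suffix_of_mem hmem0
    exact dfs_fuel (adjA edges) coins k L hch L.length _ hsuf hsuf.length_le 0 (-1) t' rfl
      (2 * edges.length + 2) L.length (le_trans hsuf.length_le hlen) hsuf.length_le 0
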